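-- pv_equiv track=rewrite | github.com/bcmin1018/codingtest | greedy/P_귤고르기.py | solution
-- ===== SOURCE A (Python) =====
-- def solution (k, tangerine):
--     answer = 0
--     dic = {}
--     # 딕셔너리를 세팅한다
--     for key in tangerine:
--         dic[key] = 0
--     # 딕셔너리에 값을 넣는다.
--     for key in tangerine:
--         dic[key] += 1
--     # dic.item에서 value를 key로 하여 내림차순 정렬한다.
--     lst = sorted(dic.items(), key=lambda x:x[1], reverse=True)
--     # value를 뽑아 k 값에서 빼주고 k가 0<으면 리턴한다.
--     for _, value in lst:
--         if k > 0:
--             k = k - value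
--             answer += 1
--         else:
--             break
--     return answer
-- ===== SOURCE B (Python) =====
-- def solution(k, tangerine):
--     # Count frequencies, then bucket the counts (count-of-counts) and walk
--     # the buckets from the largest possible count downward, taking whole
--     # equal-count groups at a time with a ceiling division -- no sorting.
--     freq = {}
--     for t in tangerine:
--         freq[t] = freq.get(t, 0) + 1
--     bucket = {}
--     for c in freq.values():
--         bucket[c] = bucket.get(c, 0) + 1
--     answer = 0
--     for c in range(len(tangerine), 0, -1):
--         if k <= 0:
--             break
--         m = bucket.get(c, 0)
--         take = m if k > m * c else -(-k // c)
--         answer += take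
--         k -= take * c
--     return answer
-- ===== Notes on version B (the rewrite author's own statement) =====
-- stated objective: alternative
-- what changed: Replaces the sort of the frequency-dict items by a count-of-counts bucket dictionary walked from the highest possible count downward, taking whole equal-count groups at once with a ceiling division; avoids sorting (O(n) vs O(n log n)) but was not measurably faster on the generated inputs.
import Mathlib
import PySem

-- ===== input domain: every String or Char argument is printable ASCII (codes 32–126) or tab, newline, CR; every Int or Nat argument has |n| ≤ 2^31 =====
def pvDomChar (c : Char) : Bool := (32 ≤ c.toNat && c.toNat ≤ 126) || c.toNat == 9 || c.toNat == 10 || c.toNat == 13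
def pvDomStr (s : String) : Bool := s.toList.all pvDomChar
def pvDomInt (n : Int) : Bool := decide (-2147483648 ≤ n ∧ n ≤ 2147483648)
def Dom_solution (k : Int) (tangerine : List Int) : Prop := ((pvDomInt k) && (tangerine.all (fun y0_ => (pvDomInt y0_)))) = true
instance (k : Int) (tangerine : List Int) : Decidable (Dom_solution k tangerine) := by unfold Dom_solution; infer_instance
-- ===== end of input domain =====

-- B replaces A's sort of the frequency-dict items by a count-of-counts bucket dict
-- walked from the highest possible count down, taking whole equal-count groups at
-- once with a ceiling division (objective: alternative, sort-free algorithm).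

-- ===== PORT A =====
-- 'for _, value in lst: if k > 0: … else: break'
def solutionLoopA : Int → Int → List (Int × Int) → Int
  | _, answer, [] => answer
  | k, answer, p :: rest =>
    if k > 0 then solutionLoopA (k - p.2) (answer + 1) rest else answer

def solution (k : Int) (tangerine : List Int) : Int :=
  let dic0 := tangerine.foldl (fun d key => d.insert key 0) PySem.Dict.empty
  let dic := tangerine.foldl (fun d key => d.modify key 0 (· + 1)) dic0
  let lst := PySem.List.sorted dic.items (fun x => x.2) true
  solutionLoopA k 0 lst

-- ===== PORT B =====
-- 'for c in range(len(tangerine), 0, -1): if k <= 0: break; …'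
def solutionLoopB (bucket : PySem.Dict Int Int) : List Int → Int → Int → Int
  | [], _, answer => answer
  | c :: cs, k, answer =>
    if k ≤ 0 then answer
    else
      let m := bucket.getD c 0
      let take := if k > m * c then m else -(PySem.Int.floordiv (-k) c)
      solutionLoopB bucket cs (k - take * c) (answer + take)

def solution_alt (k : Int) (tangerine : List Int) : Int :=
  let freq := tangerine.foldl (fun d t => d.modify t 0 (· + 1)) PySem.Dict.empty
  let bucket := freq.values.foldl (fun d c => d.modify c 0 (· + 1)) PySem.Dict.empty
  solutionLoopB bucket (PySem.List.pyRange (tangerine.length : Int) 0 (-1)) k 0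

-- ===== PRECONDITION & SPEC =====
def Spec_solution (k : Int) (tangerine : List Int) (out : Int) : Prop := out = solution_alt k tangerine
instance (k : Int) (tangerine : List Int) (out : Int) : Decidable (Spec_solution k tangerine out) := by unfold Spec_solution; infer_instance

-- ===== CLAIM (what is proved, stated in full; the proofs are below) =====
def Claim_equal_solution : Prop := ∀ (k : Int) (tangerine : List Int), Dom_solution k tangerine → Spec_solution k tangerine (solution k tangerine)

-- ===== LEMMAS AND PROOFS =====
-- pvGreedy is the common greedy core: one count at a time, descending.
def pvGreedy : Int → List Int → Int
  | _, [] => 0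
  | k, c :: cs => if k > 0 then 1 + pvGreedy (k - c) cs else 0

def pvVals (t : List Int) : List Int := (PySem.Set.ofList t).map (fun x => ((t.count x : Int)))

def pvD (t : List Int) : List Int :=
  (PySem.List.pyRange (t.length : Int) 0 (-1)).flatMap (fun c => List.replicate ((pvVals t).count c) c)

theorem loopA_greedy (l : List (Int × Int)) : ∀ (k ans : Int),
    solutionLoopA k ans l = ans + pvGreedy k (l.map (·.2)) := by
  induction l with
  | nil => intro k ans; simp [solutionLoopA, pvGreedy]
  | cons p rest ih =>
    intro k ans
    simp only [solutionLoopA, List.map_cons, pvGreedy]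
    split_ifs with h
    · rw [ih]; ring
    · simp

theorem greedy_nonpos (l : List Int) (k : Int) (h : k ≤ 0) : pvGreedy k l = 0 := by
  cases l with
  | nil => rfl
  | cons c cs => simp [pvGreedy]; omega

theorem pass1_getD : ∀ (l : List Int) (d : PySem.Dict Int Int),
    (∀ x, d.getD x 0 = 0) → ∀ x, (l.foldl (fun d key => d.insert key 0) d).getD x 0 = 0 := by
  intro l
  induction l with
  | nil => intro d h x; exact h x
  | cons a l ih =>
    intro d h x
    simp only [List.foldl_cons]
    refine ih _ (fun y => ?_) x
    by_cases hy : y = a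
    · subst hy; rw [PySem.Dict.getD_insert_self]
    · rw [PySem.Dict.getD_insert_of_ne _ _ _ hy]; exact h y

theorem A_items (t : List Int) :
    ((t.foldl (fun d key => d.modify key 0 (· + 1))
        (t.foldl (fun d key => d.insert key 0) PySem.Dict.empty)).items : List (Int × Int))
      = (PySem.Set.ofList t).map (fun x => (x, (t.count x : Int))) := by
  set d1 := t.foldl (fun d key => d.insert key 0) (PySem.Dict.empty : PySem.Dict Int Int) with hd1
  have hk1 : d1.keys = PySem.Set.ofList t := by
    rw [hd1, PySem.Dict.keys_foldl_insert t (fun _ _ => 0), PySem.Dict.keys_empty,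
      PySem.Set.update_nil_left]
  set dic := t.foldl (fun d key => d.modify key 0 (· + 1)) d1 with hdic
  have hk : dic.keys = PySem.Set.ofList t := by
    rw [hdic, PySem.Dict.keys_foldl_modify t 0 (fun _ _ v => v + 1), hk1,
      PySem.Set.update_eq_append_filter]
    have : (PySem.Set.ofList t).filter (fun y => !(PySem.Set.ofList t).contains y) = [] := by
      rw [List.filter_eq_nil_iff]
      intro a ha
      simp only [Bool.not_eq_true', Bool.not_eq_false]
      exact (PySem.Set.contains_iff _ _).mpr ha
    rw [this, List.append_nil]
  have hnd : dic.keys.Nodup := by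
    rw [hk]; exact PySem.Set.nodup_ofList t
  have hget : ∀ x, dic.getD x 0 = (t.count x : Int) := by
    intro x
    rw [hdic, PySem.Dict.getD_foldl_modify_add_one, pass1_getD t PySem.Dict.empty
      (fun y => PySem.Dict.getD_empty y 0) x, zero_add]
  rw [PySem.Dict.items_eq_map_keys dic hnd 0, hk]
  exact List.map_congr_left (fun x _ => by rw [hget x])

theorem count_flatMap_replicate (m : Int → Nat) (x : Int) :
    ∀ (cs : List Int), cs.Nodup →
    (cs.flatMap fun c => List.replicate (m c) c).count x = if x ∈ cs then m x else 0 := by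
  intro cs
  induction cs with
  | nil => intro _; simp
  | cons c cs ih =>
    intro hnd
    rw [List.nodup_cons] at hnd
    rw [List.flatMap_cons, List.count_append, ih hnd.2, List.count_replicate]
    by_cases hx : x = c
    · subst hx
      simp [hnd.1]
    · simp [hx, Ne.symm hx]

theorem pairwise_flatMap_replicate (m : Int → Nat) :
    ∀ (cs : List Int), cs.Pairwise (fun a b => b < a) →
    (cs.flatMap fun c => List.replicate (m c) c).Pairwise (fun a b => b ≤ a) := by
  intro cs
  induction cs with
  | nil => intro _; simp
  | cons c cs ih =>
    intro hp
    rw [List.pairwise_cons] at hp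
    rw [List.flatMap_cons, List.pairwise_append]
    refine ⟨List.pairwise_replicate.mpr (Or.inr le_rfl), ih hp.2, ?_⟩
    intro a ha b hb
    obtain rfl := List.eq_of_mem_replicate ha
    obtain ⟨c', hc', hb'⟩ := List.mem_flatMap.mp hb
    obtain rfl := List.eq_of_mem_replicate hb'
    exact le_of_lt (hp.1 _ hc')

theorem vals_bounds (t : List Int) : ∀ v ∈ pvVals t, 1 ≤ v ∧ v ≤ (t.length : Int) := by
  intro v hv
  obtain ⟨x, hx, rfl⟩ := List.mem_map.mp hv
  have hxt : x ∈ t := (PySem.Set.mem_ofList t x).mp hx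
  constructor
  · exact_mod_cast List.count_pos_iff.mpr hxt
  · exact_mod_cast List.count_le_length

theorem nodup_pyRange_neg (a b : Int) : (PySem.List.pyRange a b (-1)).Nodup := by
  rw [PySem.List.pyRange_neg_one_eq_reverse, List.nodup_reverse]
  exact PySem.List.nodup_pyRange_one _ _

theorem pvD_perm (t : List Int) : (pvD t).Perm (pvVals t) := by
  rw [List.perm_iff_count]
  intro a
  rw [pvD, count_flatMap_replicate _ _ _ (nodup_pyRange_neg _ _)]
  by_cases ha : a ∈ PySem.List.pyRange (t.length : Int) 0 (-1)
  · simp [ha]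
  · rw [if_neg ha, eq_comm]
    rw [List.count_eq_zero]
    intro hmem
    exact ha (PySem.List.mem_pyRange_neg_one.mpr
      ⟨by have := (vals_bounds t a hmem).1; omega, (vals_bounds t a hmem).2⟩)

theorem pvD_pairwise (t : List Int) : (pvD t).Pairwise (fun a b => b ≤ a) := by
  apply pairwise_flatMap_replicate
  rw [PySem.List.pyRange_neg_one_eq_reverse, List.pairwise_reverse]
  exact PySem.List.pairwise_lt_pyRange_one _ _

theorem sorted_snd_eq_pvD (t : List Int) :
    (PySem.List.sorted ((PySem.Set.ofList t).map (fun x => (x, (t.count x : Int))))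
        (fun x => x.2) true).map (·.2) = pvD t := by
  apply List.Perm.eq_of_pairwise (le := fun a b : Int => b ≤ a)
    (fun a b _ _ h1 h2 => le_antisymm h2 h1)
  · exact List.pairwise_map.mpr (PySem.List.sorted_pairwise_rev _ _)
  · exact pvD_pairwise t
  · refine ((PySem.List.sorted_perm _ _ _).map _).trans ?_
    rw [List.map_map]
    exact (pvD_perm t).symm

theorem solution_eq_greedy (k : Int) (t : List Int) :
    solution k t = pvGreedy k (pvD t) := by
  rw [solution]
  rw [A_items t]  -- may need simp to enter lets
  rw [loopA_greedy, sorted_snd_eq_pvD, zero_add]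

theorem greedy_replicate (c : Int) (hc : 0 < c) :
    ∀ (m : Nat) (rest : List Int) (k : Int), 0 < k →
    pvGreedy k (List.replicate m c ++ rest) =
      (if k > (m : Int) * c then (m : Int) else -(PySem.Int.floordiv (-k) c)) +
      pvGreedy (k - (if k > (m : Int) * c then (m : Int) else -(PySem.Int.floordiv (-k) c)) * c)
        rest := by
  intro m
  induction m with
  | zero =>
    intro rest k hk
    simp [hk]
  | succ m ih =>
    intro rest k hk
    rw [List.replicate_succ, List.cons_append]
    show (if k > 0 then 1 + pvGreedy (k - c) (List.replicate m c ++ rest) else 0) = _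
    rw [if_pos hk]
    push_cast
    by_cases hkc : 0 < k - c
    · rw [ih rest (k - c) hkc]
      set q := -(PySem.Int.floordiv (-(k - c)) c) with hqdef
      have hbr : (q - 1) * c < k - c ∧ k - c ≤ q * c :=
        (PySem.Int.neg_floordiv_neg_eq_iff_of_pos hc).mp rfl
      have hsucc : -(PySem.Int.floordiv (-k) c) = q + 1 := by
        rw [PySem.Int.neg_floordiv_neg_eq_iff_of_pos hc]
        constructor <;> nlinarith [hbr.1, hbr.2]
      have hcond : (k > ((m : Int) + 1) * c) ↔ (k - c > (m : Int) * c) := by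
        constructor <;> intro h <;> nlinarith
      by_cases hbig : k - c > (m : Int) * c
      · rw [if_pos hbig, if_pos (hcond.mpr hbig)]
        ring_nf
      · rw [if_neg hbig, if_neg (fun h => hbig (hcond.mp h)), hsucc]
        ring_nf
    · -- k ≤ c : greedy (k-c) … = 0, take = 1
      rw [greedy_nonpos _ _ (by omega)]
      have h1 : -(PySem.Int.floordiv (-k) c) = 1 := by
        rw [PySem.Int.neg_floordiv_neg_eq_iff_of_pos hc]
        constructor <;> nlinarith
      have hnot : ¬ (k > ((m : Int) + 1) * c) := by
        intro h
        nlinarith [Int.natCast_nonneg m]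
      rw [if_neg hnot, h1, one_mul]
      rw [greedy_nonpos _ _ (by omega)]

theorem loopB_greedy (bucket : PySem.Dict Int Int) (m : Int → Nat)
    (hb : ∀ c, bucket.getD c 0 = (m c : Int)) :
    ∀ (cs : List Int), (∀ c ∈ cs, 0 < c) → ∀ (k ans : Int),
    solutionLoopB bucket cs k ans = ans + pvGreedy k (cs.flatMap fun c => List.replicate (m c) c) := by
  intro cs
  induction cs with
  | nil => intro _ k ans; simp [solutionLoopB, pvGreedy]
  | cons c cs ih =>
    intro hpos k ans
    have hc : 0 < c := hpos c List.mem_cons_self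
    rw [List.flatMap_cons]
    show (if k ≤ 0 then ans else _) = _
    by_cases hk : k ≤ 0
    · rw [if_pos hk, greedy_nonpos _ _ hk, add_zero]
    · rw [if_neg hk]
      simp only [hb c]
      rw [ih (fun c' hc' => hpos c' (List.mem_cons_of_mem _ hc'))]
      rw [greedy_replicate c hc (m c) _ k (by omega)]
      ring

theorem alt_eq_greedy (k : Int) (t : List Int) :
    solution_alt k t = pvGreedy k (pvD t) := by
  rw [solution_alt]
  have hfreq : (t.foldl (fun d x => d.modify x 0 (· + 1)) PySem.Dict.empty) = PySem.Dict.counter t := rfl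
  rw [hfreq]
  have hvals : (PySem.Dict.counter t).values = pvVals t := by
    rw [PySem.Dict.values_eq_map_keys _ (PySem.Dict.nodup_keys_counter t) 0,
      PySem.Dict.keys_counter]
    exact List.map_congr_left (fun x _ => PySem.Dict.getD_counter t x)
  rw [hvals]
  have hb : ∀ c, ((pvVals t).foldl (fun d c => d.modify c 0 (· + 1)) PySem.Dict.empty).getD c 0
      = (((pvVals t).count c : Nat) : Int) := by
    intro c
    rw [PySem.Dict.getD_foldl_modify_add_one, PySem.Dict.getD_empty, zero_add]
  rw [loopB_greedy _ (fun c => (pvVals t).count c) hb _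
    (fun c hc => (PySem.List.mem_pyRange_neg_one.mp hc).1) k 0, zero_add]
  rfl

-- ===== VERDICT (by name: the statement is the Claim_ definition above) =====
theorem solution_spec : Claim_equal_solution := by
  intro k t _
  unfold Spec_solution
  rw [solution_eq_greedy, alt_eq_greedy]
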